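-- pv_equiv track=rewrite | github.com/NotGyashu/A_Search_Engine | ai_search/backend/core/ai_service.py | _extract_top_domains
-- ===== SOURCE A (Python) =====
-- from typing import Dict, List, Optional
--
-- def _extract_top_domains(results: List[Dict]) -> List[str]:
--     """Extract top domains from results"""
--     domain_counts = {}
--
--     for result in results:
--         domain = result.get('domain', '').strip()
--         if domain:
--             domain_counts[domain] = domain_counts.get(domain, 0) + 1
--
--     # Sort by count
--     sorted_domains = sorted(domain_counts.items(), key=lambda x: x[1], reverse=True)
--     return [domain for domain, count in sorted_domains]
-- ===== SOURCE B (Python) =====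
-- from typing import Dict, List, Optional
--
-- def _extract_top_domains(results: List[Dict]) -> List[str]:
--     """Extract top domains from results (bucket sort by frequency instead of comparison sort)"""
--     domain_counts = {}
--     for result in results:
--         domain = result.get('domain', '').strip()
--         if domain:
--             domain_counts[domain] = domain_counts.get(domain, 0) + 1
--
--     # Bucket the domains by their count; a count is at most len(results)
--     buckets = {}
--     for domain, count in domain_counts.items():
--         buckets.setdefault(count, []).append(domain)
--
--     out = []
--     for count in range(len(results), 0, -1):
--         out.extend(buckets.get(count, []))
--     return out
-- ===== Notes on version B (the rewrite author's own statement) =====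
-- stated objective: alternative
-- what changed: Replaces the comparison sort of (domain,count) items by a linear bucket pass: domains are grouped into frequency buckets in insertion order and emitted from the highest count down, preserving A's stable tie-break.
import Mathlib
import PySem

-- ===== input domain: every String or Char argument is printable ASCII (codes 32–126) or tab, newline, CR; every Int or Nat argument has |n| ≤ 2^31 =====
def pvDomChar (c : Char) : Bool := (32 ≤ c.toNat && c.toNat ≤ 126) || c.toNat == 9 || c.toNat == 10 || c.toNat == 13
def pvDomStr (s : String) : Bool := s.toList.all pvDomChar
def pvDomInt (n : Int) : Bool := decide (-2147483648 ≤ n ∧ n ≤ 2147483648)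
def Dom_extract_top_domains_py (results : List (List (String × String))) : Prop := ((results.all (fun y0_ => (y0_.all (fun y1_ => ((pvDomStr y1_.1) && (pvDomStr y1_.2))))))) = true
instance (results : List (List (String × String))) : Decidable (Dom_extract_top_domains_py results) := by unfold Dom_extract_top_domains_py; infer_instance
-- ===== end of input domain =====

-- B replaces A's comparison sort of the counted items by a frequency-bucket pass (same counting loop, same output order).

-- ===== PORT A =====
def extract_top_domains_py (results : List (List (String × String))) : List String :=
  let domain_counts : PySem.Dict String Int :=
    results.foldl (fun d result =>
      let domain := PySem.Str.strip (PySem.Dict.getD (PySem.Dict.mk result) "domain" "")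
      if domain ≠ "" then d.insert domain (d.getD domain 0 + 1) else d)
      PySem.Dict.empty
  let sorted_domains := PySem.List.sorted domain_counts.items (fun x => x.2) true
  sorted_domains.map (fun p => p.1)

-- ===== PORT B =====
def extract_top_domains_py_alt (results : List (List (String × String))) : List String :=
  let domain_counts : PySem.Dict String Int :=
    results.foldl (fun d result =>
      let domain := PySem.Str.strip (PySem.Dict.getD (PySem.Dict.mk result) "domain" "")
      if domain ≠ "" then d.insert domain (d.getD domain 0 + 1) else d)
      PySem.Dict.empty
  -- buckets.setdefault(count, []).append(domain)  ==  buckets[count] = buckets.get(count, []) + [domain]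
  let buckets : PySem.Dict Int (List String) :=
    domain_counts.items.foldl (fun b p => b.modify p.2 [] (fun l => l ++ [p.1])) PySem.Dict.empty
  (PySem.List.pyRange (results.length : Int) 0 (-1)).foldl
    (fun out c => out ++ buckets.getD c []) []

-- ===== PRECONDITION & SPEC =====
def Spec_extract_top_domains_py (results : List (List (String × String))) (out : List String) : Prop := out = extract_top_domains_py_alt results
instance (results : List (List (String × String))) (out : List String) : Decidable (Spec_extract_top_domains_py results out) := by unfold Spec_extract_top_domains_py; infer_instance

-- ===== CLAIM (what is proved, stated in full; the proofs are below) =====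
def Claim_equal_extract_top_domains_py : Prop := ∀ (results : List (List (String × String))), Dom_extract_top_domains_py results → Spec_extract_top_domains_py results (extract_top_domains_py results)

-- ===== LEMMAS AND PROOFS =====

-- the stripped domain of one result dict
def pvStripOf (result : List (String × String)) : String :=
  PySem.Str.strip (PySem.Dict.getD (PySem.Dict.mk result) "domain" "")

-- the list of non-empty stripped domains, in order
def pvNames (results : List (List (String × String))) : List String :=
  (results.filter (fun r => pvStripOf r ≠ "")).map pvStripOf

-- the counting fold, over any accumulator, is the plain count-fold over the domain list
lemma pvCounts_gen (l : List (List (String × String))) (d : PySem.Dict String Int) :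
    l.foldl (fun d r =>
      if pvStripOf r ≠ "" then d.insert (pvStripOf r) (d.getD (pvStripOf r) 0 + 1) else d) d
    = ((l.filter (fun r => pvStripOf r ≠ "")).map pvStripOf).foldl
        (fun d x => d.insert x (d.getD x 0 + 1)) d := by
  induction l generalizing d with
  | nil => rfl
  | cons r l ih =>
    simp only [List.foldl_cons, List.filter_cons]
    by_cases h : pvStripOf r = ""
    · rw [if_neg (not_not_intro h), if_neg (by simp [h])]
      exact ih d
    · rw [if_pos h, if_pos (by simp [h])]
      simp only [List.map_cons, List.foldl_cons]
      exact ih _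

-- the counting loop shared by both ports is Counter(pvNames results)
lemma pvCounts_eq (results : List (List (String × String))) :
    results.foldl (fun d result =>
      let domain := PySem.Str.strip (PySem.Dict.getD (PySem.Dict.mk result) "domain" "")
      if domain ≠ "" then d.insert domain (d.getD domain 0 + 1) else d)
      (PySem.Dict.empty : PySem.Dict String Int)
    = PySem.Dict.counter (pvNames results) := by
  show results.foldl (fun (d : PySem.Dict String Int) r =>
      if pvStripOf r ≠ "" then d.insert (pvStripOf r) (d.getD (pvStripOf r) 0 + 1) else d)
      PySem.Dict.empty = _
  rw [pvCounts_gen, PySem.Dict.foldl_insert_getD_add_one_eq_counter, pvNames]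

lemma pvFlatMap_congr {α β : Type} (l : List α) (f g : α → List β)
    (h : ∀ a ∈ l, f a = g a) : l.flatMap f = l.flatMap g := by
  simp only [List.flatMap_def]
  exact congrArg List.flatten (List.map_congr_left h)

-- insertBy walks past every element it is not 'before'
lemma pvInsertBy_append {α : Type} (bf : α → α → Bool) (x : α) (ys zs : List α)
    (h : ∀ y ∈ ys, bf x y = false) :
    PySem.List.insertBy bf x (ys ++ zs) = ys ++ PySem.List.insertBy bf x zs := by
  induction ys with
  | nil => simp
  | cons y ys ih =>
    simp only [List.cons_append, PySem.List.insertBy, h y (List.mem_cons_self)]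
    simp only [Bool.false_eq_true, if_false, List.cons.injEq, true_and]
    exact ih (fun y hy => h y (List.mem_cons_of_mem _ hy))

-- insertBy puts x in front of a list it is 'before' everywhere
lemma pvInsertBy_front {α : Type} (bf : α → α → Bool) (x : α) (zs : List α)
    (h : ∀ z ∈ zs, bf x z = true) :
    PySem.List.insertBy bf x zs = x :: zs := by
  cases zs with
  | nil => simp [PySem.List.insertBy]
  | cons z t => simp [PySem.List.insertBy, h z (List.mem_cons_self)]

-- Python's stable reverse sort by an Int key IS the bucket concatenation over any
-- strictly descending key list covering all occurring keys
lemma pvSorted_rev_eq_flatMap {α : Type} (key : α → Int) (ks : List Int)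
    (hks : ks.Pairwise (· > ·)) (xs : List α) (hx : ∀ x ∈ xs, key x ∈ ks) :
    PySem.List.sorted xs key true
      = ks.flatMap (fun k => xs.filter (fun y => decide (key y = k))) := by
  induction xs using List.reverseRecOn with
  | nil =>
    clear hks hx
    have h0 : PySem.List.sorted ([] : List α) key true = [] := rfl
    rw [h0]
    induction ks with
    | nil => rfl
    | cons a l _ => simp
  | append_singleton xs x ih =>
    have hxs : ∀ y ∈ xs, key y ∈ ks := fun y hy => hx y (by simp [hy])
    have hxk : key x ∈ ks := hx x (by simp)
    rw [PySem.List.sorted_rev_eq_foldl_insertBy, List.foldl_append,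
        ← PySem.List.sorted_rev_eq_foldl_insertBy, ih hxs]
    simp only [List.foldl_cons, List.foldl_nil]
    obtain ⟨s, t, rfl⟩ := List.append_of_mem hxk
    have hps := List.pairwise_append.mp hks
    have hs : ∀ k ∈ s, key x < k := fun k hk => hps.2.2 k hk (key x) (by simp)
    have ht : ∀ k ∈ t, k < key x := fun k hk => (List.pairwise_cons.mp hps.2.1).1 k hk
    -- buckets of keys other than `key x` ignore the appended x
    have hFs : s.flatMap (fun k => (xs ++ [x]).filter (fun y => decide (key y = k)))
        = s.flatMap (fun k => xs.filter (fun y => decide (key y = k))) := by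
      refine pvFlatMap_congr _ _ _ (fun k hk => ?_)
      have hne : ¬ (key x = k) := by have := hs k hk; omega
      simp [List.filter_append, hne]
    have hFt : t.flatMap (fun k => (xs ++ [x]).filter (fun y => decide (key y = k)))
        = t.flatMap (fun k => xs.filter (fun y => decide (key y = k))) := by
      refine pvFlatMap_congr _ _ _ (fun k hk => ?_)
      have hne : ¬ (key x = k) := by have := ht k hk; omega
      simp [List.filter_append, hne]
    have hFx : (xs ++ [x]).filter (fun y => decide (key y = key x))
        = xs.filter (fun y => decide (key y = key x)) ++ [x] := by
      simp [List.filter_append]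
    rw [List.flatMap_append, List.flatMap_cons, List.flatMap_append, List.flatMap_cons,
        hFs, hFt, hFx]
    have h1 : ∀ y ∈ s.flatMap (fun k => xs.filter (fun y => decide (key y = k)))
        ++ xs.filter (fun y => decide (key y = key x)),
        (fun a b => decide (key b < key a)) x y = false := by
      intro y hy
      rcases List.mem_append.mp hy with hy | hy
      · obtain ⟨k, hk, hyk⟩ := List.mem_flatMap.mp hy
        have : key y = k := of_decide_eq_true (List.mem_filter.mp hyk).2
        have := hs k hk
        simp only [decide_eq_false_iff_not]; omega
      · have : key y = key x := of_decide_eq_true (List.mem_filter.mp hy).2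
        simp only [decide_eq_false_iff_not]; omega
    have h2 : ∀ z ∈ t.flatMap (fun k => xs.filter (fun y => decide (key y = k))),
        (fun a b => decide (key b < key a)) x z = true := by
      intro z hz
      obtain ⟨k, hk, hzk⟩ := List.mem_flatMap.mp hz
      have : key z = k := of_decide_eq_true (List.mem_filter.mp hzk).2
      have := ht k hk
      simp only [decide_eq_true_eq]; omega
    rw [← List.append_assoc, pvInsertBy_append _ _ _ _ h1, pvInsertBy_front _ _ _ h2]
    simp [List.append_assoc]

-- the bucket dict built by B, read back at any count c
lemma pvBuckets_getD (l : List (String × Int)) (c : Int) :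
    (l.foldl (fun b p => b.modify p.2 [] (fun s => s ++ [p.1]))
      (PySem.Dict.empty : PySem.Dict Int (List String))).getD c []
    = (l.filter (fun p => decide (p.2 = c))).map (fun p => p.1) := by
  have h := PySem.Dict.getD_foldl_modify_append (l := l.map Prod.swap)
      (d := (PySem.Dict.empty : PySem.Dict Int (List String))) (c := c)
  rw [List.foldl_map] at h
  simpa [List.filter_map, Function.comp, beq_iff_eq] using h

-- every counted item's count lies in range(len(results), 0, -1)
lemma pvCounts_mem_range (results : List (List (String × String))) :
    ∀ p ∈ (PySem.Dict.counter (pvNames results)).items,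
      p.2 ∈ PySem.List.pyRange (results.length : Int) 0 (-1) := by
  intro p hp
  rw [PySem.Dict.items_counter] at hp
  obtain ⟨k, hk, rfl⟩ := List.mem_map.mp hp
  rw [PySem.List.mem_pyRange_neg_one]
  have hmem : k ∈ pvNames results := (PySem.Set.mem_ofList _ _).mp hk
  have h1 : 0 < (pvNames results).count k := List.count_pos_iff.mpr hmem
  have h2 : (pvNames results).count k ≤ (pvNames results).length := List.count_le_length
  have h3 : (pvNames results).length ≤ results.length := by
    rw [pvNames, List.length_map]
    exact List.length_filter_le _ _
  constructor <;> omega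

-- range(n, 0, -1) is strictly descending
lemma pvRange_desc (n : Int) :
    (PySem.List.pyRange n 0 (-1)).Pairwise (· > ·) := by
  rw [PySem.List.pyRange_neg_one_eq_reverse]
  rw [List.pairwise_reverse]
  exact PySem.List.pairwise_lt_pyRange_one _ _

-- ===== VERDICT (by name: the statement is the Claim_ definition above) =====
theorem extract_top_domains_py_spec : Claim_equal_extract_top_domains_py := by
  intro results _
  show extract_top_domains_py results = extract_top_domains_py_alt results
  simp only [extract_top_domains_py, extract_top_domains_py_alt]
  rw [pvCounts_eq]
  rw [PySem.List.foldl_append_eq_flatMap]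
  rw [pvSorted_rev_eq_flatMap _ _ (pvRange_desc _) _ (pvCounts_mem_range results)]
  rw [List.map_flatMap]
  simp only [List.nil_append]
  exact pvFlatMap_congr _ _ _ (fun c _ => by rw [pvBuckets_getD])
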